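-- pv_equiv track=rewrite | github.com/kayofabio/aulas-algoritmos | aula-08-25-2/ex01.py | totalPresencaPorAluno
-- ===== SOURCE A (Python) =====
-- def totalPresencaPorAluno(alunos, segunda, terca, quarta, quinta, sexta):
--     lista = []
--     for a in alunos:
--         presencas = 0
--         if a in segunda:
--             presencas += 1
--         if a in terca:
--             presencas += 1
--         if a in quarta:
--             presencas += 1
--         if a in quinta:
--             presencas += 1
--         if a in sexta:
--             presencas += 1
--         lista.append(presencas)
--     return lista
-- ===== SOURCE B (Python) =====
-- def totalPresencaPorAluno(alunos, segunda, terca, quarta, quinta, sexta):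
--     counts = {}
--     for day in (segunda, terca, quarta, quinta, sexta):
--         for s in set(day):
--             counts[s] = counts.get(s, 0) + 1
--     return [counts.get(a, 0) for a in alunos]
-- ===== Notes on version B (the rewrite author's own statement) =====
-- stated objective: faster
-- what changed: Inverts the traversal: instead of five membership scans per student, B builds a count dict in one day-major pass over the deduplicated day lists, then maps each student to its count.
import Mathlib
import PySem

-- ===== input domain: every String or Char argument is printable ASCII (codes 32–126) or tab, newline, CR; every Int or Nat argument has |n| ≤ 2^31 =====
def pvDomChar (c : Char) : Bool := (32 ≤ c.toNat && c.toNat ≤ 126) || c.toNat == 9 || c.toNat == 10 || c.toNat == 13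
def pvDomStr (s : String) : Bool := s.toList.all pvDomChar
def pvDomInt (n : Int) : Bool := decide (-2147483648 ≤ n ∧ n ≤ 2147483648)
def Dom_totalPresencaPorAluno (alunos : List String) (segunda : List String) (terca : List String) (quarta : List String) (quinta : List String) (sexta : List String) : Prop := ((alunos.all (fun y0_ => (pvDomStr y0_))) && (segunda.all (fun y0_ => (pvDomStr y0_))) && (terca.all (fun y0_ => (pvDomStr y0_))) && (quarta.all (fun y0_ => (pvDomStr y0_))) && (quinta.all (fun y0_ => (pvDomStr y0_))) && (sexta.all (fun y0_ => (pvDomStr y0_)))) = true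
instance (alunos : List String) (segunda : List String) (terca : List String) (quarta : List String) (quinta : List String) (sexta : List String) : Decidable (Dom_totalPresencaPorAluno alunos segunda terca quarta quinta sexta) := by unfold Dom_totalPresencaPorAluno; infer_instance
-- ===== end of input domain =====

-- ===== PORT A =====
-- B inverts the traversal: day-major counting into a dict, then a lookup pass over alunos (same results, different decomposition).
def totalPresencaPorAluno (alunos : List String) (segunda : List String) (terca : List String) (quarta : List String) (quinta : List String) (sexta : List String) : List Int :=
  alunos.foldl (fun lista a =>
    let presencas : Int := 0
    let presencas := if segunda.contains a then presencas + 1 else presencas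
    let presencas := if terca.contains a then presencas + 1 else presencas
    let presencas := if quarta.contains a then presencas + 1 else presencas
    let presencas := if quinta.contains a then presencas + 1 else presencas
    let presencas := if sexta.contains a then presencas + 1 else presencas
    lista ++ [presencas]) []

-- ===== PORT B =====
-- one day's inner loop: for s in set(day): counts[s] = counts.get(s, 0) + 1
def pvAddDay (counts : PySem.Dict String Int) (day : List String) : PySem.Dict String Int :=
  (PySem.Set.ofList day).foldl (fun d s => d.insert s (d.getD s 0 + 1)) counts

def totalPresencaPorAluno_alt (alunos : List String) (segunda : List String) (terca : List String) (quarta : List String) (quinta : List String) (sexta : List String) : List Int :=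
  let counts := [segunda, terca, quarta, quinta, sexta].foldl pvAddDay PySem.Dict.empty
  alunos.map (fun a => counts.getD a 0)

-- ===== PRECONDITION & SPEC =====
def Spec_totalPresencaPorAluno (alunos : List String) (segunda : List String) (terca : List String) (quarta : List String) (quinta : List String) (sexta : List String) (out : List Int) : Prop := out = totalPresencaPorAluno_alt alunos segunda terca quarta quinta sexta
instance (alunos : List String) (segunda : List String) (terca : List String) (quarta : List String) (quinta : List String) (sexta : List String) (out : List Int) : Decidable (Spec_totalPresencaPorAluno alunos segunda terca quarta quinta sexta out) := by unfold Spec_totalPresencaPorAluno; infer_instance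

-- ===== CLAIM (what is proved, stated in full; the proofs are below) =====
def Claim_equal_totalPresencaPorAluno : Prop := ∀ (alunos : List String) (segunda : List String) (terca : List String) (quarta : List String) (quinta : List String) (sexta : List String), Dom_totalPresencaPorAluno alunos segunda terca quarta quinta sexta → Spec_totalPresencaPorAluno alunos segunda terca quarta quinta sexta (totalPresencaPorAluno alunos segunda terca quarta quinta sexta)

-- ===== LEMMAS AND PROOFS =====

lemma count_ofList (xs : List String) (a : String) :
    (PySem.Set.ofList xs).count a = if a ∈ xs then 1 else 0 := by
  have nd := PySem.Set.nodup_ofList xs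
  by_cases h : a ∈ xs
  · have hm : a ∈ PySem.Set.ofList xs := (PySem.Set.mem_ofList xs a).2 h
    have h1 := List.nodup_iff_count_le_one.1 nd a
    have h2 : 0 < (PySem.Set.ofList xs).count a := List.count_pos_iff.2 hm
    rw [if_pos h]; omega
  · have hm : a ∉ PySem.Set.ofList xs := fun hc => h ((PySem.Set.mem_ofList xs a).1 hc)
    simp [h, List.count_eq_zero.2 hm]

lemma getD_pvAddDay (d : PySem.Dict String Int) (day : List String) (a : String) :
    (pvAddDay d day).getD a 0 = d.getD a 0 + (if a ∈ day then 1 else 0) := by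
  unfold pvAddDay
  rw [PySem.Dict.getD_foldl_insert_add_one, count_ofList]
  split <;> simp

lemma foldl_push {α β : Type} (f : α → β) :
    ∀ (xs : List α) (acc : List β),
      xs.foldl (fun l a => l ++ [f a]) acc = acc ++ xs.map f := by
  intro xs
  induction xs with
  | nil => simp
  | cons x t ih => intro acc; simp [ih]

-- ===== VERDICT (by name: the statement is the Claim_ definition above) =====
theorem totalPresencaPorAluno_spec : Claim_equal_totalPresencaPorAluno := by
  intro alunos segunda terca quarta quinta sexta _
  unfold Spec_totalPresencaPorAluno totalPresencaPorAluno totalPresencaPorAluno_alt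
  rw [foldl_push]
  simp only [List.nil_append]
  apply List.map_congr_left
  intro a _
  simp only [List.foldl_cons, List.foldl_nil]
  rw [getD_pvAddDay, getD_pvAddDay, getD_pvAddDay, getD_pvAddDay, getD_pvAddDay]
  simp [PySem.Dict.getD_empty]
  split_ifs <;> omega
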